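-- pv_equiv track=rewrite | github.com/peilinchen1102/Course-Projects | lab04/lab.py | nd_neighbors
-- ===== SOURCE A (Python) =====
-- def nd_neighbors(dimensions, coordinate):
--     """
--     Find all neighbors of the coordinate
--
--     Returns the set of neighbors
--
--     Parameters:
--         dimensions (tuple): dimension of the game board
--         board (list of lists): representation of the game
--         coordinate (tuple): the location
--
--     >>> nd_neighbors((10,20),(5,13)) == {(4, 12), (4, 13), (4, 14), (5, 12), (5, 13), (5, 14), (6, 12), (6, 13), (6, 14)}
--     True
--     """
--
--     result= set()
--     # base case
--     if len(coordinate) == 1: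
--         neighbors = set()
--         # find neighbor one less and one more
--         for i in [-1,0, 1]:
--             if 0 <= coordinate[0]+i < dimensions[0]:
--                 neighbors.add((coordinate[0]+i,))
--         return neighbors
--     else:
--         # recursively find neighbors for each dimension
--         neighbors = nd_neighbors(dimensions[1:], coordinate[1:])
--         for neighbor in neighbors:
--             for i in [-1,0, 1]:
--                 # condition checking if neighbor is within the index
--                 if 0 <= coordinate[0]+i < dimensions[0]:
--                     result.add((coordinate[0]+i,)+neighbor)
--     return result
-- ===== SOURCE B (Python) =====
-- def nd_neighbors(dimensions, coordinate):
--     acc = [()]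
--     for i in reversed(range(len(coordinate))):
--         c, d = coordinate[i], dimensions[i]
--         acc = [(x,) + t for t in acc
--                for x in (c - 1, c, c + 1)
--                if 0 <= x < d]
--     return set(acc)
-- ===== Notes on version B (the rewrite author's own statement) =====
-- stated objective: simpler
-- what changed: Replaces the dimension-by-dimension recursion (which slices both lists at every level and re-extends every neighbor tuple of the sub-problem) with a single iterative comprehension: fold over the coordinate indices from last to first, extending a running Cartesian product of the clipped per-dimension candidate values; no slicing, no recursion.
-- outside the precondition, e.g. on nd_neighbors((2,), (-1, 0, -1, -3)): A returns set(), B raises IndexError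
import Mathlib
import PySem

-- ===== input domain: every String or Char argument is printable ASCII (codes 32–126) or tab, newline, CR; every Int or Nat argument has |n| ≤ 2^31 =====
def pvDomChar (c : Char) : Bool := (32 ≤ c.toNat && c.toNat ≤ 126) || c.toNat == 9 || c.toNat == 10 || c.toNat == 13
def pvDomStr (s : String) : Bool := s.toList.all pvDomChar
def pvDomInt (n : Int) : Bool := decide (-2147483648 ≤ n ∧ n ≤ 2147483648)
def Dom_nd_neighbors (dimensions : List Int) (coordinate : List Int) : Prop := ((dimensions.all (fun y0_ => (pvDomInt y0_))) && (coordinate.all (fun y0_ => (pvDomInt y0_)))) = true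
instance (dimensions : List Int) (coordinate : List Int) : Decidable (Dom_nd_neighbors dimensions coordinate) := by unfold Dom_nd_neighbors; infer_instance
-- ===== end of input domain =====

-- B replaces A's dimension-by-dimension recursion by one iterative fold over the coordinate
-- indices that extends a running Cartesian product of clipped candidates (simpler decomposition).


-- ===== PORT A =====
-- literal transliteration of A; on inputs where the Python raises (empty coordinate,
-- or dimensions exhausted before coordinate) the guards return the running value ([] = empty set)
def nd_neighbors (dimensions : List Int) (coordinate : List Int) : List (List Int) :=
  match coordinate with
  | [] => []  -- Python: unbounded recursion (RecursionError); outside Pre_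
  | [c0] =>
    match dimensions with
    | [] => []  -- Python: IndexError where reached; outside Pre_
    | d0 :: _ =>
      ([-1, 0, 1] : List Int).foldl
        (fun (neighbors : PySem.Set (List Int)) i =>
          if 0 ≤ c0 + i ∧ c0 + i < d0 then PySem.Set.add neighbors [c0 + i] else neighbors)
        PySem.Set.empty
  | c0 :: c1 :: rest =>
    match dimensions with
    | [] => []  -- Python: IndexError where reached; outside Pre_
    | d0 :: dtail =>
      let neighbors := nd_neighbors dtail (c1 :: rest)
      neighbors.foldl
        (fun (result : PySem.Set (List Int)) n =>
          ([-1, 0, 1] : List Int).foldl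
            (fun (result : PySem.Set (List Int)) i =>
              if 0 ≤ c0 + i ∧ c0 + i < d0 then PySem.Set.add result ((c0 + i) :: n) else result)
            result)
        PySem.Set.empty

-- ===== PORT B =====
def nd_neighbors_alt (dimensions : List Int) (coordinate : List Int) : List (List Int) :=
  PySem.Set.ofList
    (((List.range coordinate.length).reverse).foldl
      (fun (acc : List (List Int)) i =>
        let c := coordinate.getD i 0
        let d := dimensions.getD i 0  -- Python: dimensions[i], IndexError when i ≥ |dimensions|; outside Pre_
        acc.flatMap (fun t =>
          (([c - 1, c, c + 1] : List Int).filter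
            (fun x => decide (0 ≤ x) && decide (x < d))).map
            (fun x => x :: t)))
      [[]])

-- ===== PRECONDITION & SPEC =====
-- Pre_ excludes the empty coordinate (A recurses forever) and coordinates longer than
-- dimensions, on which A raises IndexError or accidentally returns an empty set depending
-- on the sign of the trailing coordinate entry, while B raises IndexError there.
def Pre_nd_neighbors (dimensions : List Int) (coordinate : List Int) : Prop :=
  coordinate ≠ [] ∧ coordinate.length ≤ dimensions.length
instance (dimensions : List Int) (coordinate : List Int) : Decidable (Pre_nd_neighbors dimensions coordinate) := by unfold Pre_nd_neighbors; infer_instance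
def pvWitness_nd_neighbors : List Int × List Int := ([10, 20], [5, 13])

def Spec_nd_neighbors (dimensions : List Int) (coordinate : List Int) (out : List (List Int)) : Prop := out = nd_neighbors_alt dimensions coordinate
instance (dimensions : List Int) (coordinate : List Int) (out : List (List Int)) : Decidable (Spec_nd_neighbors dimensions coordinate out) := by unfold Spec_nd_neighbors; infer_instance

-- ===== CLAIM (what is proved, stated in full; the proofs are below) =====
def Claim_equal_nd_neighbors : Prop := ∀ (dimensions : List Int) (coordinate : List Int), Dom_nd_neighbors dimensions coordinate → Pre_nd_neighbors dimensions coordinate → Spec_nd_neighbors dimensions coordinate (nd_neighbors dimensions coordinate)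

-- ===== LEMMAS AND PROOFS =====

-- the per-dimension clipped candidate list of B
def pvOpts (d c : Int) : List Int :=
  ([c - 1, c, c + 1] : List Int).filter (fun x => decide (0 ≤ x) && decide (x < d))

-- B's running product before the final set() conversion
def pvBcore (dimensions coordinate : List Int) : List (List Int) :=
  ((List.range coordinate.length).reverse).foldl
    (fun (acc : List (List Int)) i =>
      acc.flatMap (fun t =>
        (pvOpts (dimensions.getD i 0) (coordinate.getD i 0)).map (fun x => x :: t)))
    [[]]

lemma pvAlt_eq_ofList_bcore (dims coord : List Int) :
    nd_neighbors_alt dims coord = PySem.Set.ofList (pvBcore dims coord) := rfl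

lemma pvBcore_nil (dims : List Int) : pvBcore dims [] = [[]] := by
  simp [pvBcore]

lemma pvBcore_cons (c : Int) (dims ct : List Int) :
    pvBcore dims (c :: ct) =
      (pvBcore dims.tail ct).flatMap
        (fun t => (pvOpts (dims.headD 0) c).map (fun x => x :: t)) := by
  have hd : dims.getD 0 0 = dims.headD 0 := by cases dims <;> rfl
  have ht : ∀ i, dims.getD (i + 1) 0 = dims.tail.getD i 0 := by
    intro i; cases dims <;> rfl
  simp only [pvBcore, List.length_cons, List.range_succ_eq_map, List.reverse_cons,
    ← List.map_reverse, List.foldl_append, List.foldl_cons, List.foldl_nil, List.foldl_map,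
    Nat.succ_eq_add_one, List.getD_cons_succ, List.getD_cons_zero, hd, ht]

lemma pvOpts_nodup (d c : Int) : (pvOpts d c).Nodup := by
  apply List.Nodup.filter
  simp only [List.nodup_cons, List.mem_cons, List.not_mem_nil, List.nodup_nil]
  constructor
  · intro h; rcases h with h | h | h <;> omega
  · refine ⟨?_, by simp⟩
    intro h; rcases h with h | h <;> omega

lemma pvFlat_nodup (d c : Int) (L : List (List Int)) (hL : L.Nodup) :
    (L.flatMap (fun t => (pvOpts d c).map (fun x => x :: t))).Nodup := by
  rw [List.nodup_flatMap]
  constructor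
  · intro t _
    exact (pvOpts_nodup d c).map (fun a b h => (List.cons.injEq _ _ _ _ ▸ h).1)
  · refine hL.imp ?_
    intro t t' hne xs hx hx'
    simp only [List.mem_map] at hx hx'
    obtain ⟨x, _, rfl⟩ := hx
    obtain ⟨x', _, he⟩ := hx'
    exact hne (by simpa using (List.cons.injEq _ _ _ _ ▸ he.symm).2)

lemma pvBcore_nodup (dims coord : List Int) : (pvBcore dims coord).Nodup := by
  induction coord generalizing dims with
  | nil => simp [pvBcore_nil]
  | cons c ct ih =>
    rw [pvBcore_cons]
    exact pvFlat_nodup _ c _ (ih dims.tail)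

-- A's inner loop over [-1,0,1] is a foldl of Set.add over B's candidate list, consed onto n
lemma pvInnerGen (d0 : Int) (n : List Int) (ys : List Int) :
    ∀ (s : PySem.Set (List Int)),
      ys.foldl
        (fun (s : PySem.Set (List Int)) y =>
          if 0 ≤ y ∧ y < d0 then PySem.Set.add s (y :: n) else s) s
      = ((ys.filter (fun x => decide (0 ≤ x) && decide (x < d0))).map
          (fun x => x :: n)).foldl PySem.Set.add s := by
  induction ys with
  | nil => intro s; rfl
  | cons y ys ih =>
    intro s
    by_cases h : 0 ≤ y ∧ y < d0
    · rw [List.foldl_cons, if_pos h,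
        List.filter_cons_of_pos (by simp only [Bool.and_eq_true, decide_eq_true_eq]; exact h)]
      simpa only [List.map_cons, List.foldl_cons] using ih _
    · rw [List.foldl_cons, if_neg h,
        List.filter_cons_of_neg (by simp only [Bool.and_eq_true, decide_eq_true_eq]; exact h)]
      exact ih _

lemma pvInner (c0 d0 : Int) (n : List Int) (s : PySem.Set (List Int)) :
    ([-1, 0, 1] : List Int).foldl
      (fun (s : PySem.Set (List Int)) i =>
        if 0 ≤ c0 + i ∧ c0 + i < d0 then PySem.Set.add s ((c0 + i) :: n) else s) s
    = ((pvOpts d0 c0).map (fun x => x :: n)).foldl PySem.Set.add s := by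
  have e1 : c0 + (-1) = c0 - 1 := by ring
  have e2 : c0 + 0 = c0 := by ring
  have h := pvInnerGen d0 n [c0 - 1, c0, c0 + 1] s
  simp only [List.foldl_cons, List.foldl_nil, e1, e2] at h ⊢
  simpa only [pvOpts] using h

-- A's outer loop collects exactly set(flatMap) of B's blocks
lemma pvOuter (c0 d0 : Int) (L : List (List Int)) :
    L.foldl
      (fun (result : PySem.Set (List Int)) n =>
        ([-1, 0, 1] : List Int).foldl
          (fun (result : PySem.Set (List Int)) i =>
            if 0 ≤ c0 + i ∧ c0 + i < d0 then PySem.Set.add result ((c0 + i) :: n) else result)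
          result) PySem.Set.empty
    = PySem.Set.ofList (L.flatMap (fun n => (pvOpts d0 c0).map (fun x => x :: n))) := by
  rw [PySem.Set.ofList_eq_foldl, List.foldl_flatMap]
  have h : ∀ (s : PySem.Set (List Int)),
      L.foldl
        (fun (result : PySem.Set (List Int)) n =>
          ([-1, 0, 1] : List Int).foldl
            (fun (result : PySem.Set (List Int)) i =>
              if 0 ≤ c0 + i ∧ c0 + i < d0 then PySem.Set.add result ((c0 + i) :: n) else result)
            result) s
      = L.foldl (fun s n => ((pvOpts d0 c0).map (fun x => x :: n)).foldl PySem.Set.add s) s := by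
    induction L with
    | nil => intro s; rfl
    | cons n L ihL =>
      intro s
      rw [List.foldl_cons (l := L), List.foldl_cons (l := L), pvInner]
      exact ihL _
  exact h PySem.Set.empty

lemma pvMain (coord dims : List Int) (hne : coord ≠ []) (hlen : coord.length ≤ dims.length) :
    nd_neighbors dims coord = nd_neighbors_alt dims coord := by
  induction coord generalizing dims with
  | nil => exact absurd rfl hne
  | cons c0 ct ih =>
    cases dims with
    | nil => simp at hlen
    | cons d0 dt =>
      cases ct with
      | nil =>
        rw [pvAlt_eq_ofList_bcore, pvBcore_cons, pvBcore_nil]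
        simp only [List.headD_cons, nd_neighbors]
        rw [pvInner c0 d0 [] PySem.Set.empty]
        simp [PySem.Set.ofList_eq_foldl, PySem.Set.empty]
      | cons c1 cr =>
        simp only [nd_neighbors]
        rw [pvOuter, ih dt (by simp) (by simpa using Nat.le_of_succ_le_succ hlen)]
        rw [pvAlt_eq_ofList_bcore dt,
          PySem.Set.ofList_eq_self_of_nodup _ (pvBcore_nodup dt (c1 :: cr)),
          pvAlt_eq_ofList_bcore (d0 :: dt), pvBcore_cons c0 (d0 :: dt) (c1 :: cr)]
        simp only [List.tail_cons, List.headD_cons]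

-- ===== VERDICT (by name: the statement is the Claim_ definition above) =====
theorem nd_neighbors_spec : Claim_equal_nd_neighbors := by
  intro dims coord _ hpre
  unfold Spec_nd_neighbors
  exact pvMain coord dims hpre.1 hpre.2
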